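-- pv_equiv track=rewrite | github.com/BarakShamailov/Synchronized-Folder- | src/auxiliary_methods.py | check_move_file_folder
-- ===== SOURCE A (Python) =====
-- def check_move_file_folder(path,folder_name):
--     destination_directory = ""
--     is_folder_in_path = False
--     folders_in_path = path.split("/")
--     for folder in folders_in_path:
--         if folder == folder_name:
--             destination_directory += folder + '/'
--             is_folder_in_path = True
--             break
--         destination_directory += folder + '/'
--     return is_folder_in_path, destination_directory
-- ===== SOURCE B (Python) =====
-- def check_move_file_folder(path, folder_name):
--     folders = path.split("/")
--     if folder_name in folders:
--         idx = folders.index(folder_name)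
--         return True, "/".join(folders[:idx + 1]) + "/"
--     return False, "/".join(folders) + "/"
-- ===== Notes on version B (the rewrite author's own statement) =====
-- stated objective: simpler
-- what changed: Replaces the accumulate-and-break loop with locate-then-slice: split once, test membership, take the prefix up to the match and '/'.join it, instead of building the string piecewise inside a loop.
import Mathlib
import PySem

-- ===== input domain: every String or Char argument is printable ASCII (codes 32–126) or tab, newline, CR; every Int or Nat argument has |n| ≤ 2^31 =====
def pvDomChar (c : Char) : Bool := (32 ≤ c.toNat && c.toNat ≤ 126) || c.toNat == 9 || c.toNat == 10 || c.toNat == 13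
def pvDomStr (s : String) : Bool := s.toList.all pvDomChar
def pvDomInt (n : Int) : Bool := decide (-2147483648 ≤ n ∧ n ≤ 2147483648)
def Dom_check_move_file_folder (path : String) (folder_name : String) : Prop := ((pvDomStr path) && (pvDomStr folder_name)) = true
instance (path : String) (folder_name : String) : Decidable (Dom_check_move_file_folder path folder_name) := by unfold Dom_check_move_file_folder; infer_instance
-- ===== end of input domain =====

-- ===== PORT A =====
-- B replaces A's accumulate-and-break loop with locate-then-slice-and-join; objective: simpler.
-- the loop of A: accumulate 'folder + "/"' into dest, break (returning True) on the first match
def cmffA_go (folder_name : String) : List String → String → Bool × String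
  | [], dest => (false, dest)
  | folder :: rest, dest =>
      if folder == folder_name then (true, dest ++ folder ++ "/")
      else cmffA_go folder_name rest (dest ++ folder ++ "/")

def check_move_file_folder (path : String) (folder_name : String) : Bool × String :=
  match PySem.Str.split? path "/" with
  | some folders => cmffA_go folder_name folders ""
  | none => (false, "")   -- unreachable: the separator "/" is nonempty

-- ===== PORT B =====
def check_move_file_folder_alt (path : String) (folder_name : String) : Bool × String :=
  match PySem.Str.split? path "/" with
  | some folders =>
      if folders.contains folder_name then
        let idx := (PySem.List.index? folders folder_name).getD 0   -- folders.index(folder_name); present by the guard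
        (true, PySem.Str.join "/" (PySem.List.slice folders none (some ((idx : Int) + 1))) ++ "/")
      else (false, PySem.Str.join "/" folders ++ "/")
  | none => (false, "")   -- unreachable: the separator "/" is nonempty

-- ===== PRECONDITION & SPEC =====
def Spec_check_move_file_folder (path : String) (folder_name : String) (out : Bool × String) : Prop := out = check_move_file_folder_alt path folder_name
instance (path : String) (folder_name : String) (out : Bool × String) : Decidable (Spec_check_move_file_folder path folder_name out) := by unfold Spec_check_move_file_folder; infer_instance

-- ===== CLAIM (what is proved, stated in full; the proofs are below) =====
def Claim_equal_check_move_file_folder : Prop := ∀ (path : String) (folder_name : String), Dom_check_move_file_folder path folder_name → Spec_check_move_file_folder path folder_name (check_move_file_folder path folder_name)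

-- ===== LEMMAS AND PROOFS =====

theorem str_ext {s t : String} (h : s.toList = t.toList) : s = t := String.toList_inj.mp h

theorem join_cons_cons_str (sep p q : String) (rest : List String) :
    PySem.Str.join sep (p :: q :: rest) = p ++ sep ++ PySem.Str.join sep (q :: rest) :=
  str_ext (by simp [PySem.Str.toList_join, PySem.Chars.join_cons_cons])

theorem join_singleton_str (sep p : String) : PySem.Str.join sep [p] = p :=
  str_ext (by simp [PySem.Str.toList_join, PySem.Chars.join_singleton])

theorem str_append_assoc (a b c : String) : a ++ b ++ c = a ++ (b ++ c) :=
  str_ext (by simp)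

-- A's loop, with the accumulator made explicit, equals "locate then join the taken prefix".
theorem cmffA_go_spec (fn : String) (l : List String) (dest : String) (hl : l ≠ []) :
    cmffA_go fn l dest =
      match PySem.List.index? l fn with
      | some idx => (true, dest ++ (PySem.Str.join "/" (l.take (idx + 1)) ++ "/"))
      | none => (false, dest ++ (PySem.Str.join "/" l ++ "/")) := by
  induction l generalizing dest with
  | nil => exact absurd rfl hl
  | cons a t ih =>
    by_cases ha : a = fn
    · subst ha
      rw [PySem.List.index?_cons_self]
      simp [cmffA_go]
      cases t with
      | nil => simp [join_singleton_str, str_append_assoc]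
      | cons b t' => simp [join_singleton_str, str_append_assoc]
    · have hbeq : (a == fn) = false := by simp [ha]
      rw [PySem.List.index?_cons_of_ne t ha]
      cases t with
      | nil =>
        simp [cmffA_go, hbeq, PySem.List.index?, join_singleton_str, str_append_assoc]
      | cons b t' =>
        have hcond : ¬((a == fn) = true) := by simp [ha]
        have step : cmffA_go fn (a :: b :: t') dest = cmffA_go fn (b :: t') (dest ++ a ++ "/") := by
          conv_lhs => rw [cmffA_go]
          rw [if_neg hcond]
        rw [step, ih (dest ++ a ++ "/") (by simp)]
        cases h : PySem.List.index? (b :: t') fn with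
        | none => simp [join_cons_cons_str, str_append_assoc]
        | some i =>
          have htake : (b :: t').take (i + 1) = b :: t'.take i := by simp
          simp [htake, join_cons_cons_str, str_append_assoc]

-- splitOn.go never returns the empty list (each base case returns a reversed cons)
theorem splitOn_go_ne_nil (sep : List Char) :
    ∀ (fuel : Nat) (l cur : List Char) (acc : List (List Char)),
      PySem.Chars.splitOn.go sep fuel l cur acc ≠ [] := by
  intro fuel
  induction fuel with
  | zero => intro l cur acc; simp [PySem.Chars.splitOn.go]
  | succ n ih =>
    intro l cur acc
    cases l with
    | nil => simp [PySem.Chars.splitOn.go]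
    | cons c rest =>
      rw [PySem.Chars.splitOn.go]
      split
      · exact ih _ _ _
      · exact ih _ _ _

theorem split?_slash (s : String) :
    ∃ l, PySem.Str.split? s "/" = some l ∧ l ≠ [] := by
  refine ⟨(PySem.Chars.splitOn s.toList ['/']).map String.ofList, ?_, ?_⟩
  · simp [PySem.Str.split?, PySem.Chars.split?]
  · simp only [ne_eq, List.map_eq_nil_iff]
    exact splitOn_go_ne_nil _ _ _ _ _

-- ===== VERDICT (by name: the statement is the Claim_ definition above) =====
theorem check_move_file_folder_spec : Claim_equal_check_move_file_folder := by
  intro path fn _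
  unfold Spec_check_move_file_folder check_move_file_folder check_move_file_folder_alt
  obtain ⟨L, hL, hne⟩ := split?_slash path
  rw [hL]
  simp only []
  rw [cmffA_go_spec fn L "" hne]
  cases h : PySem.List.index? L fn with
  | none =>
    have hmem : fn ∉ L := (PySem.List.index?_eq_none_iff L fn).mp h
    simp [hmem]
  | some i =>
    have hmem : fn ∈ L := (PySem.List.index?_isSome_iff L fn).mp (by rw [h]; rfl)
    have hc : L.contains fn = true := by simpa using hmem
    have hcast : ((i : Int) + 1) = ((i + 1 : Nat) : Int) := by push_cast; ring
    simp only [hc, if_true, Option.getD_some]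
    rw [hcast, PySem.List.slice_to_natCast]
    simp
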